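-- pv_equiv track=rewrite | github.com/Patisek/VAI | pokusAI/pokusAI.py | how_many_can_i_take
-- ===== SOURCE A (Python) =====
-- def hand_value(hand):
--     total = sum(hand)
--     number_of_aces = hand.count(11)
--     while total > 21 and number_of_aces:
--         total = total - 10
--         number_of_aces = number_of_aces -1
--     return total
--
-- def how_many_can_i_take(deck,player_hand):
--     pom_deck = deck.copy()
--     player_hand_var = player_hand.copy()
--     i=0
--     while hand_value(player_hand_var)<21:
--         player_hand_var.append(pom_deck.pop())
--         i += 1
--     return i
-- ===== SOURCE B (Python) =====
-- def _value(total, aces):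
--     # blackjack value of a hand with raw sum `total` and `aces` aces:
--     # demote aces 11 -> 1 while the hand busts, in closed form
--     if total <= 21:
--         return total
--     return total - 10 * min(aces, (total - 12) // 10)
--
-- def how_many_can_i_take(deck, player_hand):
--     total = sum(player_hand)
--     aces = player_hand.count(11)
--     taken = 0
--     for card in reversed(deck):
--         if _value(total, aces) >= 21:
--             break
--         total += card
--         if card == 11:
--             aces += 1
--         taken += 1
--     return taken
-- ===== Notes on version B (the rewrite author's own statement) =====
-- stated objective: alternative
-- what changed: B replaces A's per-draw full rescan of the hand (sum + count + ace-demotion loop inside hand_value on every iteration) with a single incremental pass over the drawn cards that maintains a running raw sum and ace count, using a closed-form expression for the ace-adjusted value; Pre_ excludes inputs where the deck runs out before the hand reaches 21, on which A raises IndexError.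
-- crash fix: When the deck is exhausted before the hand value reaches 21, A raises IndexError (pop from empty list) while B simply returns the number of cards taken (the whole deck). — e.g. on how_many_can_i_take([2], [3]): A raises IndexError, B returns 1
import Mathlib
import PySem

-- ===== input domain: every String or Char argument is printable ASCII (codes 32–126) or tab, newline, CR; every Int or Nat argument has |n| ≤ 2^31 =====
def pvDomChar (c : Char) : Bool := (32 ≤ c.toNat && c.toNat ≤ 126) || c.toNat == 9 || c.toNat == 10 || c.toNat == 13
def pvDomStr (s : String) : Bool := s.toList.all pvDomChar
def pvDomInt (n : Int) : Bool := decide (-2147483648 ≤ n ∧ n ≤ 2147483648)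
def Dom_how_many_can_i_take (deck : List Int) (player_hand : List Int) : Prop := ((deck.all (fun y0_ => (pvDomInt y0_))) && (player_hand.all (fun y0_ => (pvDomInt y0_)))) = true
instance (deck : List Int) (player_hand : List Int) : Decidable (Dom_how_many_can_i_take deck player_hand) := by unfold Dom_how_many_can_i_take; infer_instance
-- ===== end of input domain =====

-- B replaces A's per-iteration full rescan of the hand (sum + ace-demotion loop each time)
-- by a single pass over the drawn cards keeping a running raw sum and ace count, with the
-- demotion loop replaced by a closed-form value; where A raises on deck exhaustion B returns
-- the number of cards taken.


-- ===== PORT A =====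
-- while total > 21 and number_of_aces: total -= 10; number_of_aces -= 1
def hvLoop : Int → Nat → Int
  | t, 0 => t
  | t, n + 1 => if t > 21 then hvLoop (t - 10) n else t

def hand_value (hand : List Int) : Int :=
  hvLoop hand.sum (hand.count 11)

-- while hand_value(player_hand_var) < 21: player_hand_var.append(pom_deck.pop()); i += 1
-- (on an exhausted pom_deck Python raises IndexError; that case is outside Pre_, the
--  port returns the counter there)
def takeLoop (pom : List Int) (var : List Int) (i : Int) : Int :=
  if hand_value var < 21 then
    match pom with
    | [] => i
    | p :: ps => takeLoop (p :: ps).dropLast (var ++ [(p :: ps).getLast!]) (i + 1)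
  else i
termination_by pom.length
decreasing_by simp [List.length_dropLast]

def how_many_can_i_take (deck : List Int) (player_hand : List Int) : Int :=
  takeLoop deck player_hand 0

-- ===== PORT B =====
def soft_value (total : Int) (aces : Int) : Int :=
  if total ≤ 21 then total
  else total - 10 * min aces (PySem.Int.floordiv (total - 12) 10)

-- for card in reversed(deck): if value >= 21: break; … ; return taken
def bLoop : List Int → Int → Int → Int → Int
  | [], _, _, taken => taken
  | c :: rest, total, aces, taken =>
    if soft_value total aces ≥ 21 then taken
    else bLoop rest (total + c) (if c = 11 then aces + 1 else aces) (taken + 1)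

def how_many_can_i_take_alt (deck : List Int) (player_hand : List Int) : Int :=
  bLoop deck.reverse player_hand.sum (player_hand.count 11 : Int) 0

-- ===== PRECONDITION & SPEC =====
-- helper for Pre_ only: the blackjack value of a hand, in closed form
def pvHandVal (hand : List Int) : Int :=
  let s := hand.sum
  if s ≤ 21 then s else s - 10 * min (hand.count 11 : Int) ((s - 12) / 10)

-- Pre_: the loop reaches value ≥ 21 before the deck is exhausted; outside this
-- Python A raises IndexError (pop from an empty list).
def Pre_how_many_can_i_take (deck : List Int) (player_hand : List Int) : Prop :=
  ∃ j : Fin (deck.length + 1), 21 ≤ pvHandVal (player_hand ++ deck.reverse.take j.val)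

instance (deck : List Int) (player_hand : List Int) : Decidable (Pre_how_many_can_i_take deck player_hand) := by
  unfold Pre_how_many_can_i_take; infer_instance

def pvWitness_how_many_can_i_take : List Int × List Int := ([10, 10], [5, 6])

-- When the deck is exhausted before the hand reaches 21, A raises IndexError while
-- B returns the number of cards taken (the whole deck); proved in how_many_can_i_take_raises.
def Raises_how_many_can_i_take (deck : List Int) (player_hand : List Int) : Prop :=
  ∀ j : Fin (deck.length + 1), pvHandVal (player_hand ++ deck.reverse.take j.val) < 21

instance (deck : List Int) (player_hand : List Int) : Decidable (Raises_how_many_can_i_take deck player_hand) := by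
  unfold Raises_how_many_can_i_take; infer_instance

def pvRaiseWitness_how_many_can_i_take : List Int × List Int := ([2], [3])
def pvRaiseWitnessOut_how_many_can_i_take : Int := 1

def Spec_how_many_can_i_take (deck : List Int) (player_hand : List Int) (out : Int) : Prop := out = how_many_can_i_take_alt deck player_hand
instance (deck : List Int) (player_hand : List Int) (out : Int) : Decidable (Spec_how_many_can_i_take deck player_hand out) := by unfold Spec_how_many_can_i_take; infer_instance

-- ===== CLAIM (what is proved, stated in full; the proofs are below) =====
def Claim_equal_how_many_can_i_take : Prop := ∀ (deck : List Int) (player_hand : List Int), Dom_how_many_can_i_take deck player_hand → Pre_how_many_can_i_take deck player_hand → Spec_how_many_can_i_take deck player_hand (how_many_can_i_take deck player_hand)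

def Claim_raises_how_many_can_i_take : Prop := (∀ (deck : List Int) (player_hand : List Int), Dom_how_many_can_i_take deck player_hand → Raises_how_many_can_i_take deck player_hand → ¬ Pre_how_many_can_i_take deck player_hand) ∧ (Dom_how_many_can_i_take (pvRaiseWitness_how_many_can_i_take.1) (pvRaiseWitness_how_many_can_i_take.2) ∧ Raises_how_many_can_i_take (pvRaiseWitness_how_many_can_i_take.1) (pvRaiseWitness_how_many_can_i_take.2) ∧ how_many_can_i_take_alt (pvRaiseWitness_how_many_can_i_take.1) (pvRaiseWitness_how_many_can_i_take.2) = pvRaiseWitnessOut_how_many_can_i_take)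

-- ===== LEMMAS AND PROOFS =====

-- one demotion step of A's loop, expressed on B's closed form
theorem soft_value_step (t : Int) (n : Nat) (h : t > 21) :
    soft_value t ((n : Int) + 1) = soft_value (t - 10) n := by
  simp only [soft_value, PySem.Int.floordiv_eq_ediv_of_pos (show (0:Int) < 10 by omega)]
  split_ifs <;> omega

-- A's demotion loop equals B's closed form
theorem hvLoop_eq_soft_value (n : Nat) : ∀ t : Int, hvLoop t n = soft_value t n := by
  induction n with
  | zero =>
    intro t
    simp only [hvLoop, soft_value, Nat.cast_zero,
      PySem.Int.floordiv_eq_ediv_of_pos (show (0:Int) < 10 by omega)]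
    split_ifs <;> omega
  | succ n ih =>
    intro t
    by_cases h : t > 21
    · rw [show hvLoop t (n + 1) = hvLoop (t - 10) n by simp [hvLoop, h], ih,
        Nat.cast_add, Nat.cast_one, soft_value_step t n h]
    · simp only [hvLoop, h, if_false, soft_value,
        PySem.Int.floordiv_eq_ediv_of_pos (show (0:Int) < 10 by omega)]
      split_ifs <;> omega

theorem hand_value_eq (hand : List Int) :
    hand_value hand = soft_value hand.sum (hand.count 11 : Int) := by
  simp [hand_value, hvLoop_eq_soft_value]

-- the two loops agree: A's loop on r.reverse, popping from the back, is B's loop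
-- over r, consuming from the front while keeping the running sum and ace count
theorem takeLoop_eq_bLoop (r : List Int) : ∀ (var : List Int) (i : Int),
    takeLoop r.reverse var i = bLoop r var.sum (var.count 11 : Int) i := by
  induction r with
  | nil =>
    intro var i
    rw [takeLoop.eq_def]
    simp [bLoop]
  | cons c rest ih =>
    intro var i
    rw [takeLoop.eq_def]
    simp only [List.reverse_cons, bLoop, hand_value_eq var]
    by_cases h : soft_value var.sum (var.count 11 : Int) ≥ 21
    · rw [if_neg (by omega), if_pos h]
    · rw [if_pos (by omega), if_neg h]
      rcases hrc : rest.reverse ++ [c] with _ | ⟨x, xs⟩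
      · exact absurd hrc (by simp)
      · show takeLoop (x :: xs).dropLast (var ++ [(x :: xs).getLast!]) (i + 1) = _
        rw [← hrc, List.dropLast_concat]
        have hlast : (rest.reverse ++ [c]).getLast! = c := by simp
        have hcnt : ((var ++ [c]).count 11 : Int) =
            if c = 11 then (var.count 11 : Int) + 1 else (var.count 11 : Int) := by
          rcases eq_or_ne c 11 with hc | hc
          · simp [List.count_append, hc]
          · simp [List.count_append, hc]
        rw [hlast, ih (var ++ [c]) (i + 1), List.sum_append, List.sum_cons,
          List.sum_nil, hcnt]
        ring_nf

-- ===== VERDICT (by name: the statement is the Claim_ definition above) =====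
theorem how_many_can_i_take_spec : Claim_equal_how_many_can_i_take := by
  intro deck player_hand _ _
  unfold Spec_how_many_can_i_take how_many_can_i_take how_many_can_i_take_alt
  have h := takeLoop_eq_bLoop deck.reverse player_hand 0
  rwa [List.reverse_reverse] at h

theorem how_many_can_i_take_raises : Claim_raises_how_many_can_i_take := by
  unfold Claim_raises_how_many_can_i_take
  refine ⟨?_, by decide⟩
  intro deck player_hand _ hR ⟨j, hj⟩
  exact absurd hj (by have := hR j; omega)

-- self-check (uses the theorem above): the raise witness satisfies Dom and Raises_, and B returns the stated value there
theorem pvRaiseWitness_ok :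
    Dom_how_many_can_i_take (pvRaiseWitness_how_many_can_i_take.1) (pvRaiseWitness_how_many_can_i_take.2) ∧
    Raises_how_many_can_i_take (pvRaiseWitness_how_many_can_i_take.1) (pvRaiseWitness_how_many_can_i_take.2) ∧
    how_many_can_i_take_alt (pvRaiseWitness_how_many_can_i_take.1) (pvRaiseWitness_how_many_can_i_take.2) = pvRaiseWitnessOut_how_many_can_i_take :=
  how_many_can_i_take_raises.2
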